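-- pv_equiv track=rewrite | github.com/dev-soragoto/simple-bot | src/plugins/nonebot-plugin-qqshell/shell/shell.py | parse
-- ===== SOURCE A (Python) =====
-- def parse(command: str):
--     map_dict = {
--         "#esc": "\x1b",
--         "#ctrlc": "\x03",
--         "#ctrld": "\x04",
--         "#ctrlz": "\x1a",
--         "#ctrll": "\x0c",
--         "#enter": "\r"
--     }
--
--     for key, value in map_dict.items():
--         command = command.replace(key, value)
--
--     if command.endswith("#direct"):
--         command = command[:-7]
--     else:
--         command = f'{command}\r'
--
--     return command
-- ===== SOURCE B (Python) =====
-- def parse(command: str):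
--     out = []
--     i, n = 0, len(command)
--     while i < n:
--         if command.startswith("#esc", i):
--             out.append("\x1b"); i += 4
--         elif command.startswith("#ctrlc", i):
--             out.append("\x03"); i += 6
--         elif command.startswith("#ctrld", i):
--             out.append("\x04"); i += 6
--         elif command.startswith("#ctrlz", i):
--             out.append("\x1a"); i += 6
--         elif command.startswith("#ctrll", i):
--             out.append("\x0c"); i += 6
--         elif command.startswith("#enter", i):
--             out.append("\r"); i += 6
--         else:
--             out.append(command[i]); i += 1
--     body = "".join(out)
--     if body.endswith("#direct"):
--         return body[:-7]
--     return body + "\r"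
-- ===== Notes on version B (the rewrite author's own statement) =====
-- stated objective: alternative
-- what changed: Replaces the six sequential full-string str.replace passes by a single left-to-right scan that tests each token once per position (one pass over the string instead of six).
import Mathlib
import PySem

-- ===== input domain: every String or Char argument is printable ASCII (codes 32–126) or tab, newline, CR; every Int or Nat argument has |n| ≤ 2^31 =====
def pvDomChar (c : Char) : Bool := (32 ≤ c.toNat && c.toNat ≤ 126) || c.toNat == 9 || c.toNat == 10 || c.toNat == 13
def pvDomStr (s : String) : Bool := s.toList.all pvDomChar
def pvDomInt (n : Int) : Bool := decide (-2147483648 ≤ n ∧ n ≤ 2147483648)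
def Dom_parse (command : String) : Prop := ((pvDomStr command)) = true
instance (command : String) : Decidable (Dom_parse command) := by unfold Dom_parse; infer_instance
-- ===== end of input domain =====

-- B replaces the six sequential full-string replace passes of A by a single left-to-right
-- scan that tests each escape token once per position (objective: alternative structure).

-- ===== PORT A =====
-- A: six str.replace passes in dict insertion order, then strip "#direct" or append "\r".
def parse (command : String) : String :=
  let c1 := PySem.Str.replace command "#esc" "\x1b"
  let c2 := PySem.Str.replace c1 "#ctrlc" "\x03"
  let c3 := PySem.Str.replace c2 "#ctrld" "\x04"
  let c4 := PySem.Str.replace c3 "#ctrlz" "\x1a"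
  let c5 := PySem.Str.replace c4 "#ctrll" "\x0c"
  let c6 := PySem.Str.replace c5 "#enter" "\r"
  if PySem.Str.endswith c6 "#direct" = true then PySem.Str.slice c6 none (some (-7))
  else c6 ++ "\r"

-- ===== PORT B =====
-- B's while-loop over positions with startswith tests, as structural recursion on the chars.
def scanB : List Char → List Char
  | [] => []
  | c :: t =>
    if ['#','e','s','c'] <+: (c :: t) then '\x1b' :: scanB (t.drop 3)
    else if ['#','c','t','r','l','c'] <+: (c :: t) then '\x03' :: scanB (t.drop 5)
    else if ['#','c','t','r','l','d'] <+: (c :: t) then '\x04' :: scanB (t.drop 5)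
    else if ['#','c','t','r','l','z'] <+: (c :: t) then '\x1a' :: scanB (t.drop 5)
    else if ['#','c','t','r','l','l'] <+: (c :: t) then '\x0c' :: scanB (t.drop 5)
    else if ['#','e','n','t','e','r'] <+: (c :: t) then '\r' :: scanB (t.drop 5)
    else c :: scanB t
termination_by s => s.length
decreasing_by all_goals simp

def parse_alt (command : String) : String :=
  let body := String.ofList (scanB command.toList)
  if PySem.Str.endswith body "#direct" = true then PySem.Str.slice body none (some (-7))
  else body ++ "\r"

-- ===== PRECONDITION & SPEC =====
def Spec_parse (command : String) (out : String) : Prop := out = parse_alt command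
instance (command : String) (out : String) : Decidable (Spec_parse command out) := by unfold Spec_parse; infer_instance

-- ===== CLAIM (what is proved, stated in full; the proofs are below) =====
def Claim_equal_parse : Prop := ∀ (command : String), Dom_parse command → Spec_parse command (parse command)

-- ===== LEMMAS AND PROOFS =====

-- A recursive characterisation of Python str.replace (leftmost, non-overlapping), for k ≠ [].
def R (k v : List Char) : List Char → List Char
  | [] => []
  | c :: t => if k <+: (c :: t) then v ++ R k v (t.drop (k.length - 1)) else c :: R k v t
termination_by s => s.length
decreasing_by all_goals simp

theorem R_nil (k v : List Char) : R k v [] = [] := by rw [R]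

theorem R_cons_of_not_prefix (k v : List Char) (c : Char) (t : List Char)
    (h : ¬ k <+: c :: t) : R k v (c :: t) = c :: R k v t := by rw [R, if_neg h]

theorem go_eq_R (k v : List Char) (hk : k ≠ []) :
    ∀ (fuel : Nat) (l acc : List Char), l.length ≤ fuel →
      PySem.Chars.replace.go k v fuel l acc = acc.reverse ++ R k v l := by
  intro fuel
  induction fuel with
  | zero =>
    intro l acc hl
    have : l = [] := by cases l <;> simp_all
    subst this
    simp [PySem.Chars.replace.go.eq_1, R]
  | succ n ih =>
    intro l acc hl
    cases l with
    | nil => simp [PySem.Chars.replace.go.eq_2 k v (n+1) acc (by omega), R]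
    | cons c t =>
      rw [PySem.Chars.replace.go.eq_3]
      by_cases hp : k <+: (c :: t)
      · rw [if_pos (List.isPrefixOf_iff_prefix.mpr hp)]
        have hkl : 1 ≤ k.length := by cases k <;> simp_all
        have hdrop : List.drop k.length (c :: t) = t.drop (k.length - 1) := by
          cases k with
          | nil => simp_all
          | cons a b => simp
        have hlen : (List.drop k.length (c :: t)).length ≤ n := by
          simp at hl ⊢; omega
        rw [ih _ _ hlen, hdrop]
        conv_rhs => rw [R]
        rw [if_pos hp]
        simp
      · rw [if_neg (by simp [List.isPrefixOf_iff_prefix, hp])]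
        have hlen : t.length ≤ n := by simp at hl; omega
        rw [ih _ _ hlen]
        conv_rhs => rw [R]
        rw [if_neg hp]
        simp

theorem replace_eq_R (s k v : List Char) (hk : k ≠ []) :
    PySem.Chars.replace s k v = R k v s := by
  rw [PySem.Chars.replace]
  rw [if_neg (by simp [List.isEmpty_iff, hk])]
  simpa using go_eq_R k v hk s.length s [] le_rfl

-- Replacing k by a single char x cannot create a new occurrence of a word w avoiding x.
theorem prefix_of_prefix_R (k : List Char) (x : Char) (w : List Char)
    (hw : ∀ ch ∈ w, ch ≠ x) : ∀ t : List Char, w <+: R k [x] t → w <+: t := by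
  suffices h : ∀ (n : Nat) (w t : List Char), t.length ≤ n → (∀ ch ∈ w, ch ≠ x) →
      w <+: R k [x] t → w <+: t by
    intro t; exact h t.length w t le_rfl hw
  intro n
  induction n with
  | zero =>
    intro w t ht _
    have : t = [] := by cases t <;> simp_all
    subst this; simp [R_nil]
  | succ n ih =>
    intro w t ht hw
    cases t with
    | nil => simp [R_nil]
    | cons c t' =>
      rw [R]
      by_cases hp : k <+: (c :: t')
      · rw [if_pos hp]
        intro hpre
        cases w with
        | nil => exact List.nil_prefix
        | cons a w' =>
          exfalso
          have := (List.cons_prefix_cons.mp (by simpa using hpre)).1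
          exact hw a (by simp) this
      · rw [if_neg hp]
        intro hpre
        cases w with
        | nil => exact List.nil_prefix
        | cons a w' =>
          obtain ⟨ha, hw'⟩ := List.cons_prefix_cons.mp hpre
          exact List.cons_prefix_cons.mpr
            ⟨ha, ih w' t' (by simp at ht; omega) (fun ch hc => hw ch (by simp [hc])) hw'⟩

-- The composition of A's six replaces equals B's one-pass scan.
theorem comp_eq_scanB : ∀ (s : List Char),
    R ['#','e','n','t','e','r'] ['\r']
      (R ['#','c','t','r','l','l'] ['\x0c']
        (R ['#','c','t','r','l','z'] ['\x1a']
          (R ['#','c','t','r','l','d'] ['\x04']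
            (R ['#','c','t','r','l','c'] ['\x03']
              (R ['#','e','s','c'] ['\x1b'] s))))) = scanB s := by
  suffices h : ∀ (n : Nat) (s : List Char), s.length ≤ n →
      R ['#','e','n','t','e','r'] ['\r']
        (R ['#','c','t','r','l','l'] ['\x0c']
          (R ['#','c','t','r','l','z'] ['\x1a']
            (R ['#','c','t','r','l','d'] ['\x04']
              (R ['#','c','t','r','l','c'] ['\x03']
                (R ['#','e','s','c'] ['\x1b'] s))))) = scanB s by
    intro s; exact h s.length s le_rfl
  intro n
  induction n with
  | zero =>
    intro s hs
    have : s = [] := by cases s <;> simp_all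
    subst this
    simp [R, scanB]
  | succ n ih =>
    intro s hs
    by_cases h1 : ['#','e','s','c'] <+: s
    · obtain ⟨u, rfl⟩ := h1
      have hu : u.length ≤ n := by simp at hs; omega
      simp [R, scanB, List.cons_prefix_cons, ih u hu]
    by_cases h2 : ['#','c','t','r','l','c'] <+: s
    · obtain ⟨u, rfl⟩ := h2
      have hu : u.length ≤ n := by simp at hs; omega
      simp [R, scanB, List.cons_prefix_cons, ih u hu]
    by_cases h3 : ['#','c','t','r','l','d'] <+: s
    · obtain ⟨u, rfl⟩ := h3
      have hu : u.length ≤ n := by simp at hs; omega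
      simp [R, scanB, List.cons_prefix_cons, ih u hu]
    by_cases h4 : ['#','c','t','r','l','z'] <+: s
    · obtain ⟨u, rfl⟩ := h4
      have hu : u.length ≤ n := by simp at hs; omega
      simp [R, scanB, List.cons_prefix_cons, ih u hu]
    by_cases h5 : ['#','c','t','r','l','l'] <+: s
    · obtain ⟨u, rfl⟩ := h5
      have hu : u.length ≤ n := by simp at hs; omega
      simp [R, scanB, List.cons_prefix_cons, ih u hu]
    by_cases h6 : ['#','e','n','t','e','r'] <+: s
    · obtain ⟨u, rfl⟩ := h6
      have hu : u.length ≤ n := by simp at hs; omega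
      simp [R, scanB, List.cons_prefix_cons, ih u hu]
    cases s with
    | nil => simp [R, scanB]
    | cons c t =>
      have ht : t.length ≤ n := by simp at hs; omega
      -- the head char is copied untouched by every pass
      have e1 : R ['#','e','s','c'] ['\x1b'] (c :: t)
          = c :: R ['#','e','s','c'] ['\x1b'] t := R_cons_of_not_prefix _ _ _ _ h1
      set t1 := R ['#','e','s','c'] ['\x1b'] t with ht1
      have n2 : ¬ ['#','c','t','r','l','c'] <+: c :: t1 := by
        intro hp
        obtain ⟨hc, hw⟩ := List.cons_prefix_cons.mp hp
        exact h2 (List.cons_prefix_cons.mpr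
          ⟨hc, prefix_of_prefix_R ['#','e','s','c'] '\x1b' ['c','t','r','l','c'] (by simp) t (hw)⟩)
      have e2 : R ['#','c','t','r','l','c'] ['\x03'] (c :: t1)
          = c :: R ['#','c','t','r','l','c'] ['\x03'] t1 := R_cons_of_not_prefix _ _ _ _ n2
      set t2 := R ['#','c','t','r','l','c'] ['\x03'] t1 with ht2
      have n3 : ¬ ['#','c','t','r','l','d'] <+: c :: t2 := by
        intro hp
        obtain ⟨hc, hw⟩ := List.cons_prefix_cons.mp hp
        exact h3 (List.cons_prefix_cons.mpr
          ⟨hc, prefix_of_prefix_R ['#','e','s','c'] '\x1b' ['c','t','r','l','d'] (by simp) t (prefix_of_prefix_R ['#','c','t','r','l','c'] '\x03' ['c','t','r','l','d'] (by simp) t1 (hw))⟩)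
      have e3 : R ['#','c','t','r','l','d'] ['\x04'] (c :: t2)
          = c :: R ['#','c','t','r','l','d'] ['\x04'] t2 := R_cons_of_not_prefix _ _ _ _ n3
      set t3 := R ['#','c','t','r','l','d'] ['\x04'] t2 with ht3
      have n4 : ¬ ['#','c','t','r','l','z'] <+: c :: t3 := by
        intro hp
        obtain ⟨hc, hw⟩ := List.cons_prefix_cons.mp hp
        exact h4 (List.cons_prefix_cons.mpr
          ⟨hc, prefix_of_prefix_R ['#','e','s','c'] '\x1b' ['c','t','r','l','z'] (by simp) t (prefix_of_prefix_R ['#','c','t','r','l','c'] '\x03' ['c','t','r','l','z'] (by simp) t1 (prefix_of_prefix_R ['#','c','t','r','l','d'] '\x04' ['c','t','r','l','z'] (by simp) t2 (hw)))⟩)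
      have e4 : R ['#','c','t','r','l','z'] ['\x1a'] (c :: t3)
          = c :: R ['#','c','t','r','l','z'] ['\x1a'] t3 := R_cons_of_not_prefix _ _ _ _ n4
      set t4 := R ['#','c','t','r','l','z'] ['\x1a'] t3 with ht4
      have n5 : ¬ ['#','c','t','r','l','l'] <+: c :: t4 := by
        intro hp
        obtain ⟨hc, hw⟩ := List.cons_prefix_cons.mp hp
        exact h5 (List.cons_prefix_cons.mpr
          ⟨hc, prefix_of_prefix_R ['#','e','s','c'] '\x1b' ['c','t','r','l','l'] (by simp) t (prefix_of_prefix_R ['#','c','t','r','l','c'] '\x03' ['c','t','r','l','l'] (by simp) t1 (prefix_of_prefix_R ['#','c','t','r','l','d'] '\x04' ['c','t','r','l','l'] (by simp) t2 (prefix_of_prefix_R ['#','c','t','r','l','z'] '\x1a' ['c','t','r','l','l'] (by simp) t3 (hw))))⟩)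
      have e5 : R ['#','c','t','r','l','l'] ['\x0c'] (c :: t4)
          = c :: R ['#','c','t','r','l','l'] ['\x0c'] t4 := R_cons_of_not_prefix _ _ _ _ n5
      set t5 := R ['#','c','t','r','l','l'] ['\x0c'] t4 with ht5
      have n6 : ¬ ['#','e','n','t','e','r'] <+: c :: t5 := by
        intro hp
        obtain ⟨hc, hw⟩ := List.cons_prefix_cons.mp hp
        exact h6 (List.cons_prefix_cons.mpr
          ⟨hc, prefix_of_prefix_R ['#','e','s','c'] '\x1b' ['e','n','t','e','r'] (by simp) t (prefix_of_prefix_R ['#','c','t','r','l','c'] '\x03' ['e','n','t','e','r'] (by simp) t1 (prefix_of_prefix_R ['#','c','t','r','l','d'] '\x04' ['e','n','t','e','r'] (by simp) t2 (prefix_of_prefix_R ['#','c','t','r','l','z'] '\x1a' ['e','n','t','e','r'] (by simp) t3 (prefix_of_prefix_R ['#','c','t','r','l','l'] '\x0c' ['e','n','t','e','r'] (by simp) t4 (hw)))))⟩)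
      have e6 : R ['#','e','n','t','e','r'] ['\r'] (c :: t5)
          = c :: R ['#','e','n','t','e','r'] ['\r'] t5 := R_cons_of_not_prefix _ _ _ _ n6
      rw [e1, e2, e3, e4, e5, e6]
      conv_rhs => rw [scanB]
      rw [if_neg h1, if_neg h2, if_neg h3, if_neg h4, if_neg h5, if_neg h6]
      rw [ht5, ht4, ht3, ht2, ht1]
      exact congrArg (c :: ·) (ih t ht)

-- ===== VERDICT (by name: the statement is the Claim_ definition above) =====
theorem parse_spec : Claim_equal_parse := by
  intro command _
  unfold Spec_parse parse parse_alt
  simp only [PySem.Str.replace, String.toList_ofList]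
  rw [replace_eq_R _ _ _ (by simp), replace_eq_R _ _ _ (by simp),
      replace_eq_R _ _ _ (by simp), replace_eq_R _ _ _ (by simp),
      replace_eq_R _ _ _ (by simp), replace_eq_R _ _ _ (by simp)]
  rw [show ("#esc" : String).toList = ['#','e','s','c'] from rfl,
      show ("#ctrlc" : String).toList = ['#','c','t','r','l','c'] from rfl,
      show ("#ctrld" : String).toList = ['#','c','t','r','l','d'] from rfl,
      show ("#ctrlz" : String).toList = ['#','c','t','r','l','z'] from rfl,
      show ("#ctrll" : String).toList = ['#','c','t','r','l','l'] from rfl,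
      show ("#enter" : String).toList = ['#','e','n','t','e','r'] from rfl,
      show ("\x1b" : String).toList = ['\x1b'] from rfl,
      show ("\x03" : String).toList = ['\x03'] from rfl,
      show ("\x04" : String).toList = ['\x04'] from rfl,
      show ("\x1a" : String).toList = ['\x1a'] from rfl,
      show ("\x0c" : String).toList = ['\x0c'] from rfl,
      show ("\r" : String).toList = ['\r'] from rfl]
  rw [comp_eq_scanB]
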